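-- pv_equiv track=rewrite | github.com/neilcampbell/valar | projects/valar-smart-contracts/tests/delegator_contract/utils.py | get_path_to_state
-- ===== SOURCE A (Python) =====
-- from typing import Literal
--
-- POSSIBLE_STATES = Literal[
--     "START",
--     "CREATED",
--     "SET",
--     "READY",
--     "SUBMITTED",
--     "ENDED_CANNOT_PAY",
--     "ENDED_EXPIRED",
--     "ENDED_LIMITS",
--     "ENDED_NOT_CONFIRMED",
--     "ENDED_NOT_SUBMITTED",
--     "ENDED_SUSPENDED",
--     "ENDED_WITHDREW",
--     "LIVE",
-- ]
--
-- EXTENDED_POSSIBLE_STATES_WITH_VIA = Literal[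
--     "ENDED_CANNOT_PAY_VIA_READY",
--     "ENDED_CANNOT_PAY_VIA_SUBMITTED",
--     "ENDED_CANNOT_PAY_VIA_LIVE",
-- ]
--
-- def get_path_to_state(
--
--     target_state : POSSIBLE_STATES | EXTENDED_POSSIBLE_STATES_WITH_VIA,
--     current_state : POSSIBLE_STATES | None = None,
-- ) -> list[str]:
--     """
--     Returns a list of actions that transition from the start to the target state.
--     """
--     to_start = []
--     to_created = [*to_start, "contract_create"]
--     to_set = [*to_created, "contract_setup"]
--     to_ready = [*to_set, "contract_pay"]
--     to_submitted = [*to_ready, "keys_submit"]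
--     to_live = [*to_submitted, "keys_confirm"]
--
--     state_transitions = {
--         "START": to_start,
--         "CREATED": to_created,
--         "SET": to_set,
--         "READY": to_ready,
--         "SUBMITTED": to_submitted,
--         "LIVE": to_live,
--         "ENDED_NOT_SUBMITTED": [*to_ready, "keys_not_submitted"],
--         "ENDED_NOT_CONFIRMED": [*to_submitted, "keys_not_confirmed"],
--         "ENDED_LIMITS": [*to_live, "breach_limits"],
--         "ENDED_WITHDREW": [*to_live, "contract_withdraw"],
--         "ENDED_EXPIRED": [*to_live, "contract_expired"],
--         "ENDED_SUSPENDED": [*to_live, "breach_suspended"],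
--         "ENDED_CANNOT_PAY_VIA_READY": [*to_ready, "breach_pay"],
--         "ENDED_CANNOT_PAY_VIA_SUBMITTED": [*to_submitted, "breach_pay"],
--         "ENDED_CANNOT_PAY_VIA_LIVE": [*to_live, "breach_pay"],
--     }
--
--     if target_state not in state_transitions:
--         raise ValueError(f"Unknown target state: {target_state}")
--
--     if current_state is not None:
--         path = [item for item in state_transitions[target_state] if item not in state_transitions[current_state]]
--     else:
--         path = state_transitions[target_state]
--
--     return path
-- ===== SOURCE B (Python) =====
-- PRED = {
--     "START": None,
--     "CREATED": ("START", "contract_create"),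
--     "SET": ("CREATED", "contract_setup"),
--     "READY": ("SET", "contract_pay"),
--     "SUBMITTED": ("READY", "keys_submit"),
--     "LIVE": ("SUBMITTED", "keys_confirm"),
--     "ENDED_NOT_SUBMITTED": ("READY", "keys_not_submitted"),
--     "ENDED_NOT_CONFIRMED": ("SUBMITTED", "keys_not_confirmed"),
--     "ENDED_LIMITS": ("LIVE", "breach_limits"),
--     "ENDED_WITHDREW": ("LIVE", "contract_withdraw"),
--     "ENDED_EXPIRED": ("LIVE", "contract_expired"),
--     "ENDED_SUSPENDED": ("LIVE", "breach_suspended"),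
--     "ENDED_CANNOT_PAY_VIA_READY": ("READY", "breach_pay"),
--     "ENDED_CANNOT_PAY_VIA_SUBMITTED": ("SUBMITTED", "breach_pay"),
--     "ENDED_CANNOT_PAY_VIA_LIVE": ("LIVE", "breach_pay"),
-- }
--
--
-- def _path(state):
--     actions = []
--     s = state
--     while PRED[s] is not None:
--         pred, action = PRED[s]
--         actions.append(action)
--         s = pred
--     actions.reverse()
--     return actions
--
--
-- def get_path_to_state(target_state, current_state=None):
--     if target_state not in PRED:
--         raise ValueError(f"Unknown target state: {target_state}")
--     path = _path(target_state)
--     if current_state is not None: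
--         cur = _path(current_state)
--         path = [item for item in path if item not in cur]
--     return path
-- ===== Notes on version B (the rewrite author's own statement) =====
-- stated objective: alternative
-- what changed: Replaces A's eagerly built full-path table (15 dict entries of prefix-copied lists) by a predecessor map plus a backward walk that reconstructs a state's action list on demand, then the same membership filter.
-- outside the precondition, e.g. on get_path_to_state('START', 'X'): A returns [], B raises KeyError
import Mathlib
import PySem

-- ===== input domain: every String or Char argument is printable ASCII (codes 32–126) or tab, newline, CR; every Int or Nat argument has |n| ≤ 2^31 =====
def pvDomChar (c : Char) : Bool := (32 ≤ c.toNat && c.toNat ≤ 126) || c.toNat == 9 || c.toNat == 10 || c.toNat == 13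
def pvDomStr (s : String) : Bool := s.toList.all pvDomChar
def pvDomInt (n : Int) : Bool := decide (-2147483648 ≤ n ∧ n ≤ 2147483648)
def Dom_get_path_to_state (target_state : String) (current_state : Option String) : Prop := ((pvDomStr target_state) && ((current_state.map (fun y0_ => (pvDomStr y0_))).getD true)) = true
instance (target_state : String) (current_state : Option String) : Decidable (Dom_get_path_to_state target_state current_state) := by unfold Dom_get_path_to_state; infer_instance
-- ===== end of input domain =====

-- B replaces A's eagerly built full-path table by a predecessor map walked backward; equivalence is about the return value on valid states.

-- ===== PORT A =====
-- A builds all 15 full action paths up front in a dict and filters the target's path.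
def pvStateTransitions : PySem.Dict String (List String) :=
  let to_start : List String := []
  let to_created := to_start ++ ["contract_create"]
  let to_set := to_created ++ ["contract_setup"]
  let to_ready := to_set ++ ["contract_pay"]
  let to_submitted := to_ready ++ ["keys_submit"]
  let to_live := to_submitted ++ ["keys_confirm"]
  (((((((((((((((PySem.Dict.empty).insert "START" to_start).insert
    "CREATED" to_created).insert
    "SET" to_set).insert
    "READY" to_ready).insert
    "SUBMITTED" to_submitted).insert
    "LIVE" to_live).insert
    "ENDED_NOT_SUBMITTED" (to_ready ++ ["keys_not_submitted"])).insert
    "ENDED_NOT_CONFIRMED" (to_submitted ++ ["keys_not_confirmed"])).insert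
    "ENDED_LIMITS" (to_live ++ ["breach_limits"])).insert
    "ENDED_WITHDREW" (to_live ++ ["contract_withdraw"])).insert
    "ENDED_EXPIRED" (to_live ++ ["contract_expired"])).insert
    "ENDED_SUSPENDED" (to_live ++ ["breach_suspended"])).insert
    "ENDED_CANNOT_PAY_VIA_READY" (to_ready ++ ["breach_pay"])).insert
    "ENDED_CANNOT_PAY_VIA_SUBMITTED" (to_submitted ++ ["breach_pay"])).insert
    "ENDED_CANNOT_PAY_VIA_LIVE" (to_live ++ ["breach_pay"])

def get_path_to_state (target_state : String) (current_state : Option String) : List String :=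
  -- 'target not in dict' raises ValueError; a missing current_state raises KeyError: both excluded by Pre_
  match current_state with
  | some cs =>
      ((pvStateTransitions.get? target_state).getD []).filter
        (fun item => !(((pvStateTransitions.get? cs).getD []).contains item))
  | none => (pvStateTransitions.get? target_state).getD []

-- ===== PORT B =====
-- B: predecessor map; each non-START state points at (predecessor, action).
def pvPred : PySem.Dict String (Option (String × String)) :=
  (((((((((((((((PySem.Dict.empty).insert "START" (none : Option (String × String))).insert
    "CREATED" (some ("START", "contract_create"))).insert
    "SET" (some ("CREATED", "contract_setup"))).insert
    "READY" (some ("SET", "contract_pay"))).insert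
    "SUBMITTED" (some ("READY", "keys_submit"))).insert
    "LIVE" (some ("SUBMITTED", "keys_confirm"))).insert
    "ENDED_NOT_SUBMITTED" (some ("READY", "keys_not_submitted"))).insert
    "ENDED_NOT_CONFIRMED" (some ("SUBMITTED", "keys_not_confirmed"))).insert
    "ENDED_LIMITS" (some ("LIVE", "breach_limits"))).insert
    "ENDED_WITHDREW" (some ("LIVE", "contract_withdraw"))).insert
    "ENDED_EXPIRED" (some ("LIVE", "contract_expired"))).insert
    "ENDED_SUSPENDED" (some ("LIVE", "breach_suspended"))).insert
    "ENDED_CANNOT_PAY_VIA_READY" (some ("READY", "breach_pay"))).insert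
    "ENDED_CANNOT_PAY_VIA_SUBMITTED" (some ("SUBMITTED", "breach_pay"))).insert
    "ENDED_CANNOT_PAY_VIA_LIVE" (some ("LIVE", "breach_pay"))

-- backward walk of Source B's while loop; fuel bounds the walk (the chain has depth ≤ 16)
def pvWalk : Nat → String → List String → List String
  | 0, _, actions => actions
  | fuel + 1, s, actions =>
      match (pvPred.get? s).getD none with
      | none => actions
      | some (pred, action) => pvWalk fuel pred (actions ++ [action])

def pvPath (state : String) : List String := (pvWalk 16 state []).reverse

def get_path_to_state_alt (target_state : String) (current_state : Option String) : List String :=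
  let path := pvPath target_state
  match current_state with
  | some cs =>
      let cur := pvPath cs
      path.filter (fun item => !(cur.contains item))
  | none => path

-- ===== PRECONDITION & SPEC =====
def pvKeys : List String :=
  ["START", "CREATED", "SET", "READY", "SUBMITTED", "LIVE",
   "ENDED_NOT_SUBMITTED", "ENDED_NOT_CONFIRMED", "ENDED_LIMITS", "ENDED_WITHDREW",
   "ENDED_EXPIRED", "ENDED_SUSPENDED",
   "ENDED_CANNOT_PAY_VIA_READY", "ENDED_CANNOT_PAY_VIA_SUBMITTED", "ENDED_CANNOT_PAY_VIA_LIVE"]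

-- Pre_ excludes an unknown target_state (A raises ValueError) and an unknown non-None current_state
-- (A raises KeyError — except the accidental corner target="START" where A's comprehension over the
-- empty path never evaluates the lookup and returns []; B naturally raises KeyError there).
def Pre_get_path_to_state (target_state : String) (current_state : Option String) : Prop :=
  target_state ∈ pvKeys ∧ (current_state.getD "START") ∈ pvKeys
instance (target_state : String) (current_state : Option String) : Decidable (Pre_get_path_to_state target_state current_state) := by unfold Pre_get_path_to_state; infer_instance

def pvWitness_get_path_to_state : String × Option String := ("ENDED_CANNOT_PAY_VIA_LIVE", some "READY")

def Spec_get_path_to_state (target_state : String) (current_state : Option String) (out : List String) : Prop := out = get_path_to_state_alt target_state current_state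
instance (target_state : String) (current_state : Option String) (out : List String) : Decidable (Spec_get_path_to_state target_state current_state out) := by unfold Spec_get_path_to_state; infer_instance

-- ===== CLAIM (what is proved, stated in full; the proofs are below) =====
def Claim_equal_get_path_to_state : Prop := ∀ (target_state : String) (current_state : Option String), Dom_get_path_to_state target_state current_state → Pre_get_path_to_state target_state current_state → Spec_get_path_to_state target_state current_state (get_path_to_state target_state current_state)

-- ===== LEMMAS AND PROOFS =====

-- ===== VERDICT (by name: the statement is the Claim_ definition above) =====
theorem get_path_to_state_spec : Claim_equal_get_path_to_state := by
  intro ts cs _ hpre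
  unfold Spec_get_path_to_state
  obtain ⟨ht, hc⟩ := hpre
  simp only [pvKeys, List.mem_cons, List.not_mem_nil, or_false] at ht
  rcases cs with _ | c
  · rcases ht with rfl | rfl | rfl | rfl | rfl | rfl | rfl | rfl | rfl | rfl | rfl | rfl | rfl | rfl | rfl <;> decide
  · simp only [Option.getD_some, pvKeys, List.mem_cons, List.not_mem_nil, or_false] at hc
    rcases ht with rfl | rfl | rfl | rfl | rfl | rfl | rfl | rfl | rfl | rfl | rfl | rfl | rfl | rfl | rfl <;>
      rcases hc with rfl | rfl | rfl | rfl | rfl | rfl | rfl | rfl | rfl | rfl | rfl | rfl | rfl | rfl | rfl <;>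
      decide
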